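-- pv_equiv track=rewrite | github.com/GTU-Contributions/CSE321_AlgorithmDesign | AlternatingDisks.py | AlternatingDisks
-- ===== SOURCE A (Python) =====
-- def AlternatingDisks(DisksList):
--     startIndex = 0
--     endIndex = len(DisksList)-1
--     moves = 0
--     swapped = 1
--     while(swapped):
--         swapped = 0
--
--         for i in range(startIndex, endIndex, 2):
--             DisksList[i], DisksList[i+1] = DisksList[i+1], DisksList[i] # swapp i and i+1 disk
--             swapped = 1
--             moves += 1
--
--         startIndex += 1
--         endIndex -= 1
--
--     return moves
-- ===== SOURCE B (Python) =====
-- def AlternatingDisks(DisksList):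
--     # Closed form: the swap count depends only on len(DisksList).
--     # (Note: unlike A, B does not mutate DisksList; equivalence is about the return value.)
--     q = len(DisksList) // 2
--     return q * (q + 1) // 2
-- ===== Notes on version B (the rewrite author's own statement) =====
-- stated objective: faster
-- what changed: Replaced the quadratic swap-simulation loop by the closed-form triangular-number formula q*(q+1)//2 with q = len(DisksList)//2 (B does not mutate the input list; the return value is identical).
import Mathlib
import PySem

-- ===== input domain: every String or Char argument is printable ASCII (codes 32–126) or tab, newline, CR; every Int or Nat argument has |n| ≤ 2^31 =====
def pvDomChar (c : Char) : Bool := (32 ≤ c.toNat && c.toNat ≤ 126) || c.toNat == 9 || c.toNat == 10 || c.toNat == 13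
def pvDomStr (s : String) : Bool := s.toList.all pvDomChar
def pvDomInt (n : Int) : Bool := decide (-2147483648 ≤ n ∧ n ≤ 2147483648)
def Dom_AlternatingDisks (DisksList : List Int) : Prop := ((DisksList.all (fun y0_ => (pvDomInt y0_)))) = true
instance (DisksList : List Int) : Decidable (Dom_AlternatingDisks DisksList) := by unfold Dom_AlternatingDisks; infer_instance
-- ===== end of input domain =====

-- B replaces A's O(n^2) pair-swapping simulation by the closed-form formula q*(q+1)//2
-- with q = len(DisksList)//2 (the move count depends only on the length); A mutates its
-- argument list in place, B does not — the equivalence proved here is about the return value.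

-- ===== PORT A =====
-- body of the inner 'for i in range(startIndex, endIndex, 2)' loop: swap i and i+1,
-- set swapped = 1, moves += 1.  The indices i, i+1 are always in range while A runs
-- (i < endIndex ≤ len-1), so Python never raises here and pyGetD/pySetD are exact.
def pvSwapStep (s : List Int × Int × Bool) (i : Int) : List Int × Int × Bool :=
  let lst := s.1
  let tmp := (PySem.List.pyGetD lst (i + 1) 0, PySem.List.pyGetD lst i 0)
  (PySem.List.pySetD (PySem.List.pySetD lst i tmp.1) (i + 1) tmp.2, s.2.1 + 1, true)

-- after the for-loop, the flag is true exactly when the range was non-empty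
-- (cited by pvLoopA's decreasing_by)
theorem pvSwapStep_foldl (r : List Int) :
    ∀ (l : List Int) (m : Int) (b : Bool),
      (r.foldl pvSwapStep (l, m, b)).2.1 = m + r.length ∧
      (r.foldl pvSwapStep (l, m, b)).2.2 = (b || !r.isEmpty) := by
  induction r with
  | nil => intro l m b; simp
  | cons x xs ih =>
      intro l m b
      simp only [List.foldl_cons, pvSwapStep]
      rcases ih (PySem.List.pySetD (PySem.List.pySetD l x (PySem.List.pyGetD l (x + 1) 0))
          (x + 1) (PySem.List.pyGetD l x 0)) (m + 1) true with ⟨h1, h2⟩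
      refine ⟨by rw [h1]; simp; ring, by rw [h2]; simp⟩

theorem pvRange_two_nonempty {a b : Int} (h : PySem.List.pyRange a b 2 ≠ []) : a < b := by
  by_contra hab
  apply h
  rw [PySem.List.pyRange_of_pos a b (by norm_num)]
  simp [if_neg hab]

-- the 'while(swapped)' loop of A, with state (DisksList, startIndex, endIndex, moves)
def pvLoopA (lst : List Int) (startI endI moves : Int) : Int :=
  let st := (PySem.List.pyRange startI endI 2).foldl pvSwapStep (lst, moves, false)
  if h : st.2.2 = true then
    pvLoopA st.1 (startI + 1) (endI - 1) st.2.1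
  else
    st.2.1
termination_by (endI - startI).toNat
decreasing_by
  have hne : PySem.List.pyRange startI endI 2 ≠ [] := by
    intro hnil
    rw [(pvSwapStep_foldl _ lst moves false).2, hnil] at h
    simp at h
  have := pvRange_two_nonempty hne
  omega

def AlternatingDisks (DisksList : List Int) : Int :=
  pvLoopA DisksList 0 (PySem.List.len DisksList - 1) 0

-- ===== PORT B =====
def AlternatingDisks_alt (DisksList : List Int) : Int :=
  let q := PySem.Int.floordiv (PySem.List.len DisksList) 2
  PySem.Int.floordiv (q * (q + 1)) 2

-- ===== PRECONDITION & SPEC =====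
def Spec_AlternatingDisks (DisksList : List Int) (out : Int) : Prop := out = AlternatingDisks_alt DisksList
instance (DisksList : List Int) (out : Int) : Decidable (Spec_AlternatingDisks DisksList out) := by unfold Spec_AlternatingDisks; infer_instance

-- ===== CLAIM (what is proved, stated in full; the proofs are below) =====
def Claim_equal_AlternatingDisks : Prop := ∀ (DisksList : List Int), Dom_AlternatingDisks DisksList → Spec_AlternatingDisks DisksList (AlternatingDisks DisksList)

-- ===== LEMMAS AND PROOFS =====

-- abstract move count of the while loop as a function of d = endIndex - startIndex:
-- one round contributes ceil(d/2) = (d+1)/2 moves and shrinks d by 2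
def pvG (d : Int) : Int :=
  if d ≤ 0 then 0 else (d + 1) / 2 + pvG (d - 2)
termination_by d.toNat
decreasing_by omega

theorem pvG_nonpos {d : Int} (h : d ≤ 0) : pvG d = 0 := by
  unfold pvG; simp [h]

theorem pvG_pos {d : Int} (h : 0 < d) : pvG d = (d + 1) / 2 + pvG (d - 2) := by
  rw [pvG]; simp [show ¬ d ≤ 0 by omega]

theorem pvLoopA_eq (k : Nat) :
    ∀ (lst : List Int) (s e m : Int), (e - s).toNat ≤ k →
      pvLoopA lst s e m = m + pvG (e - s) := by
  induction k with
  | zero =>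
      intro lst s e m hk
      have hse : e ≤ s := by omega
      rw [pvLoopA]
      have hnil : PySem.List.pyRange s e 2 = [] := by
        rw [PySem.List.pyRange_of_pos s e (by norm_num)]
        simp [show ¬ s < e by omega]
      rw [hnil]
      simp [pvG_nonpos (show e - s ≤ 0 by omega)]
  | succ k ih =>
      intro lst s e m hk
      rw [pvLoopA]
      rcases (pvSwapStep_foldl (PySem.List.pyRange s e 2) lst m false) with ⟨h1, h2⟩
      by_cases hse : s < e
      · have hlen : (PySem.List.pyRange s e 2).length = (e - s + 1) / 2 := by
          rw [PySem.List.length_pyRange_of_pos s e (by norm_num)]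
          simp only [if_pos hse]
          omega
        have hne : PySem.List.pyRange s e 2 ≠ [] := by
          intro hnil
          rw [hnil] at hlen; simp at hlen; omega
        have hb : ((PySem.List.pyRange s e 2).foldl pvSwapStep (lst, m, false)).2.2 = true := by
          rw [h2]; simp [hne]
        rw [dif_pos hb, h1]
        rw [ih _ _ _ _ (by omega)]
        rw [pvG_pos (show 0 < e - s by omega)]
        have : e - 1 - (s + 1) = e - s - 2 := by ring
        rw [this]
        rw [hlen]
        omega
      · have hnil : PySem.List.pyRange s e 2 = [] := by
          rw [PySem.List.pyRange_of_pos s e (by norm_num)]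
          simp [hse]
        have hb : ((PySem.List.pyRange s e 2).foldl pvSwapStep (lst, m, false)).2.2 = false := by
          rw [h2, hnil]; simp
        rw [hb]
        simp only [Bool.false_eq_true, dif_neg, not_false_iff]
        rw [h1, hnil]
        simp [pvG_nonpos (show e - s ≤ 0 by omega)]

-- closed form: 2 * pvG m = c * (c + 1) with c = ceil(m/2) = (m+1)/2, for natural m
theorem pvG_two_mul (m : Nat) :
    2 * pvG (m : Int) = (((m + 1) / 2 : Nat) : Int) * (((m + 1) / 2 : Nat) + 1) := by
  induction m using Nat.strong_induction_on with
  | _ m ih =>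
      match m with
      | 0 => simp [pvG_nonpos (by norm_num : (0 : Int) ≤ 0)]
      | 1 =>
          rw [pvG_pos (by norm_num)]
          norm_num [pvG_nonpos (by norm_num : (-1 : Int) ≤ 0)]
      | (m + 2) =>
          have hpos : (0 : Int) < ((m + 2 : Nat) : Int) := by push_cast; omega
          rw [pvG_pos hpos]
          have h2 : ((m + 2 : Nat) : Int) - 2 = (m : Int) := by push_cast; ring
          rw [h2]
          have ihm := ih m (by omega)
          have hc : ((m + 2 + 1) / 2 : Nat) = ((m + 1) / 2 : Nat) + 1 := by omega
          rw [hc]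
          have hceil : (((m + 2 : Nat) : Int) + 1) / 2 = (((m + 1) / 2 : Nat) : Int) + 1 := by
            push_cast; omega
          rw [hceil]
          push_cast at ihm ⊢
          ring_nf
          ring_nf at ihm
          omega

-- ===== VERDICT (by name: the statement is the Claim_ definition above) =====
theorem AlternatingDisks_spec : Claim_equal_AlternatingDisks := by
  intro lst _
  unfold Spec_AlternatingDisks AlternatingDisks AlternatingDisks_alt
  rw [pvLoopA_eq ((PySem.List.len lst - 1 - 0).toNat) lst 0 (PySem.List.len lst - 1) 0 le_rfl]
  simp only [PySem.List.len_eq]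
  rw [PySem.Int.floordiv_eq_ediv_of_pos (by norm_num),
      PySem.Int.floordiv_eq_ediv_of_pos (by norm_num)]
  match hn : lst.length with
  | 0 =>
      norm_num
      exact pvG_nonpos (by norm_num)
  | (n + 1) =>
      have h1 : ((n + 1 : Nat) : Int) - 1 - 0 = (n : Int) := by push_cast; ring
      rw [h1]
      have h2 := pvG_two_mul n
      have hq : ((n + 1 : Nat) : Int) / 2 = (((n + 1) / 2 : Nat) : Int) := by
        push_cast; omega
      rw [hq]
      omega
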